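-- pv_equiv track=rewrite | github.com/akumar40/Google-foobar-challange | Queue to do.py | solution
-- ===== SOURCE A (Python) =====
-- def XOR(n):
--     val = n % 4
--     if val == 0:
--         return n
--     if val == 1:
--         return 1
--     if val == 2:
--         return n + 1
--     return 0
--
-- def solution(start, length):
--     if start < 0 or length < 0:
--         return 0
--     if start + (length * length) - 1 > 2000000000:
--         return 0
--     if length == 1:
--         return start
--     val = XOR(start + 2*(length-1))
--     if start > 1:
--         val = val ^ XOR(start - 1)
--     for i in range(length-2):
--         elems = length - 2 - i
--         init = start + length*(2 + i) - 1
--         val = val ^ XOR(init + elems) ^ XOR(init)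
--     return val
-- ===== SOURCE B (Python) =====
-- def solution(start, length):
--     if start < 0 or length < 0:
--         return 0
--     if start + (length * length) - 1 > 2000000000:
--         return 0
--     val = 0
--     for r in range(length):
--         for c in range(length - r):
--             val ^= start + r * length + c
--     return val
-- ===== Notes on version B (the rewrite author's own statement) =====
-- stated objective: simpler
-- what changed: Replaces the closed-form prefix-XOR row reduction (XOR trick with per-row interval formulas) by a plain nested loop that XORs every element start + r*length + c of the triangular grid directly, which also drops the then-redundant length==1 shortcut.
-- intended difference: For length == 0 (an empty grid) with 0 <= start <= 2000000001 and start != 1, A's prefix-XOR seed evaluates XOR(start-2)^XOR(start-1) and returns start-1 (even -1 for start 0), while B returns 0, the XOR of no elements, which is the intended checksum of an empty queue. — e.g. on solution(0, 0): A returns -1, B returns 0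
import Mathlib
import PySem

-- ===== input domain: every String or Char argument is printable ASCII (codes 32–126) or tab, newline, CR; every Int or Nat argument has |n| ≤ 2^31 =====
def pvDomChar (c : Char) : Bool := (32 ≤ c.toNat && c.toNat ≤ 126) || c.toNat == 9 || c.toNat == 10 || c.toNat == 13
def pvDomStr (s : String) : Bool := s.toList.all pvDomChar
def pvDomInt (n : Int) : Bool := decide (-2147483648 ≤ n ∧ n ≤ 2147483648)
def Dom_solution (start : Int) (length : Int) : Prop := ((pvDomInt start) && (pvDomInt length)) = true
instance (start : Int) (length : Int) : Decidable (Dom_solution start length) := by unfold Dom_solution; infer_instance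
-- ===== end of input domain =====

-- B replaces A's closed-form prefix-XOR row reduction by a direct nested XOR over every
-- element of the triangular grid (simpler structure, not faster: O(length^2) vs A's O(length)).

-- ===== PORT A =====
def pyXOR (n : Int) : Int :=
  let val := PySem.Int.mod n 4
  if val = 0 then n
  else if val = 1 then 1
  else if val = 2 then n + 1
  else 0

def solution (start : Int) (length : Int) : Int :=
  if start < 0 ∨ length < 0 then 0
  else if start + (length * length) - 1 > 2000000000 then 0
  else if length = 1 then start
  else
    -- Python locals elems = length-2-i and init = start+length*(2+i)-1 are inlined
    (PySem.List.pyRange 0 (length - 2) 1).foldl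
      (fun val i =>
        PySem.Int.bxor
          (PySem.Int.bxor val (pyXOR (start + length * (2 + i) - 1 + (length - 2 - i))))
          (pyXOR (start + length * (2 + i) - 1)))
      (if start > 1 then PySem.Int.bxor (pyXOR (start + 2 * (length - 1))) (pyXOR (start - 1))
       else pyXOR (start + 2 * (length - 1)))

-- ===== PORT B =====
def solution_alt (start : Int) (length : Int) : Int :=
  if start < 0 ∨ length < 0 then 0
  else if start + (length * length) - 1 > 2000000000 then 0
  else
    (PySem.List.pyRange 0 length 1).foldl (fun val r =>
      (PySem.List.pyRange 0 (length - r) 1).foldl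
        (fun v c => PySem.Int.bxor v (start + r * length + c)) val) 0

-- ===== PRECONDITION & SPEC =====
-- For length == 0 (an empty grid) with 0 ≤ start ≤ 2000000001 and start ≠ 1, A's prefix-XOR seed
-- evaluates XOR(start-2)^XOR(start-1) and returns start-1 (even -1 for start 0), while B returns 0,
-- the XOR of no elements, which is the intended checksum of an empty queue.
def D_solution (start : Int) (length : Int) : Prop :=
  length = 0 ∧ 0 ≤ start ∧ start ≠ 1 ∧ start ≤ 2000000001
instance (start : Int) (length : Int) : Decidable (D_solution start length) := by
  unfold D_solution; infer_instance

def Spec_solution (start : Int) (length : Int) (out : Int) : Prop :=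
  ¬ D_solution start length → out = solution_alt start length
instance (start : Int) (length : Int) (out : Int) : Decidable (Spec_solution start length out) := by
  unfold Spec_solution; infer_instance

def pvDiffWitness_solution : Int × Int := (0, 0)
def pvDiffWitnessOut_solution : Int × Int := (-1, 0)

-- ===== CLAIM (what is proved, stated in full; the proofs are below) =====
def Claim_unchanged_solution : Prop := ∀ (start : Int) (length : Int), Dom_solution start length → Spec_solution start length (solution start length)
def Claim_changed_solution : Prop := Dom_solution (pvDiffWitness_solution.1) (pvDiffWitness_solution.2) ∧ D_solution (pvDiffWitness_solution.1) (pvDiffWitness_solution.2) ∧ solution (pvDiffWitness_solution.1) (pvDiffWitness_solution.2) = pvDiffWitnessOut_solution.1 ∧ solution_alt (pvDiffWitness_solution.1) (pvDiffWitness_solution.2) = pvDiffWitnessOut_solution.2 ∧ pvDiffWitnessOut_solution.1 ≠ pvDiffWitnessOut_solution.2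
def Claim_exact_solution : Prop := ∀ (start : Int) (length : Int), Dom_solution start length → D_solution start length → solution start length ≠ solution_alt start length

-- ===== LEMMAS AND PROOFS =====

-- XOR of the naturals in [0, n)
def natQ (n : Nat) : Nat := (List.range n).foldl (· ^^^ ·) 0

-- closed form of A's helper XOR on a nonnegative argument m (equals natQ (m+1))
def natC (m : Nat) : Nat :=
  if m % 4 = 0 then m else if m % 4 = 1 then 1 else if m % 4 = 2 then m + 1 else 0

lemma foldl_xor_shift (g : Nat → Nat) (l : List Nat) (v : Nat) :
    l.foldl (fun a i => a ^^^ g i) v = v ^^^ l.foldl (fun a i => a ^^^ g i) 0 := by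
  induction l generalizing v with
  | nil => simp
  | cons x xs ih =>
      simp only [List.foldl_cons]
      rw [ih (v ^^^ g x), ih (0 ^^^ g x)]
      simp [Nat.xor_assoc]

lemma natQ_succ (n : Nat) : natQ (n + 1) = natQ n ^^^ n := by
  simp [natQ, List.range_succ]

lemma two_mul_xor_one (k : Nat) : (2 * k) ^^^ 1 = 2 * k + 1 := by
  apply Nat.eq_of_testBit_eq
  intro i
  cases i with
  | zero => simp [Nat.testBit_zero]
  | succ j => simp [Nat.testBit_succ]

lemma even_xor_succ (n : Nat) (h : n % 2 = 0) : n ^^^ (n + 1) = 1 := by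
  obtain ⟨k, rfl⟩ : ∃ k, n = 2 * k := ⟨n / 2, by omega⟩
  rw [← two_mul_xor_one, ← Nat.xor_assoc, Nat.xor_self, Nat.zero_xor]

lemma natQ_closed (m : Nat) : natQ (m + 1) = natC m := by
  induction m with
  | zero => simp [natQ, natC, List.range_succ]
  | succ n ih =>
      rw [natQ_succ, ih]
      have h4 : n % 4 = 0 ∨ n % 4 = 1 ∨ n % 4 = 2 ∨ n % 4 = 3 := by omega
      rcases h4 with h | h | h | h
      · rw [show natC n = n by simp [natC, h],
            show natC (n + 1) = 1 by simp [natC, show (n+1) % 4 = 1 by omega]]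
        exact even_xor_succ n (by omega)
      · rw [show natC n = 1 by simp [natC, h],
            show natC (n + 1) = n + 1 + 1 by simp [natC, show (n+1) % 4 = 2 by omega]]
        obtain ⟨k, hk⟩ : ∃ k, n + 1 = 2 * k := ⟨(n+1)/2, by omega⟩
        rw [Nat.xor_comm, hk, two_mul_xor_one]
      · rw [show natC n = n + 1 by simp [natC, h],
            show natC (n + 1) = 0 by simp [natC, show (n+1) % 4 = 3 by omega]]
        exact Nat.xor_self (n + 1)
      · rw [show natC n = 0 by simp [natC, h],
            show natC (n + 1) = n + 1 by simp [natC, show (n+1) % 4 = 0 by omega]]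
        exact Nat.zero_xor (n + 1)

-- XOR of the naturals in [a, a+n) equals natQ (a+n) ^^^ natQ a
lemma natQ_interval (a n : Nat) :
    (List.range n).foldl (fun v c => v ^^^ (a + c)) 0 = natQ (a + n) ^^^ natQ a := by
  have h : natQ (a + n) = natQ a ^^^ (List.range n).foldl (fun v c => v ^^^ (a + c)) 0 := by
    unfold natQ
    rw [List.range_add, List.foldl_append, List.foldl_map]
    exact foldl_xor_shift (fun c => a + c) (List.range n) _
  rw [h, Nat.xor_comm (natQ a), Nat.xor_assoc, Nat.xor_self, Nat.xor_zero]

lemma natQ_zero : natQ 0 = 0 := rfl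
lemma natQ_one : natQ 1 = 0 := rfl

lemma pyRange_cast (L : Nat) :
    PySem.List.pyRange 0 (L : Int) 1 = List.map (fun k : Nat => (k : Int)) (List.range L) := by
  rw [PySem.List.pyRange_one]; simp

lemma pyRange_cast_sub (L r : Nat) :
    PySem.List.pyRange 0 ((L : Int) - (r : Int)) 1
      = List.map (fun k : Nat => (k : Int)) (List.range (L - r)) := by
  rw [PySem.List.pyRange_one]; simp [Int.toNat_sub L r]

lemma pyXOR_natCast (m : Nat) : pyXOR (m : Int) = ((natC m : Nat) : Int) := by
  unfold pyXOR natC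
  have hmod : PySem.Int.mod (m : Int) 4 = ((m % 4 : Nat) : Int) := by
    exact_mod_cast PySem.Int.mod_natCast m 4
  rw [hmod]
  rcases (by omega : m % 4 = 0 ∨ m % 4 = 1 ∨ m % 4 = 2 ∨ m % 4 = 3) with h | h | h | h <;>
    simp [h]

-- cast bridge for a fold of Int xors over a list of naturals
lemma foldl_bxor_cast (g : Nat → Nat) (l : List Nat) (v : Nat) :
    l.foldl (fun acc k => PySem.Int.bxor acc ((g k : Nat) : Int)) ((v : Nat) : Int)
      = ((l.foldl (fun acc k => acc ^^^ g k) v : Nat) : Int) := by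
  induction l generalizing v with
  | nil => rfl
  | cons x xs ih =>
      simp only [List.foldl_cons, PySem.Int.bxor_natCast]
      exact ih (v ^^^ g x)

-- cast bridge for an outer fold whose step maps casts to casts
lemma fold_cast_outer (F : Int → Int → Int) (G : Nat → Nat → Nat) :
    ∀ (l : List Nat) (v : Nat), (∀ (w r : Nat), r ∈ l → F ((w : Nat) : Int) ((r : Nat) : Int) = ((G w r : Nat) : Int)) →
      (List.map (fun k : Nat => (k : Int)) l).foldl F ((v : Nat) : Int) = ((l.foldl G v : Nat) : Int) := by
  intro l
  induction l with
  | nil => intro v _; rfl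
  | cons x xs ih =>
      intro v h
      simp only [List.map_cons, List.foldl_cons]
      rw [h v x (by simp)]
      exact ih (G v x) (fun w r hr => h w r (by simp [hr]))

-- the core Nat identity: direct row-by-row XOR equals A's merged-first-two-rows form
lemma nat_main (s k : Nat) :
    (List.range (2 + k)).foldl
        (fun v r => v ^^^ (natQ (s + r * (2 + k) + ((2 + k) - r)) ^^^ natQ (s + r * (2 + k)))) 0
      = (List.range k).foldl
          (fun v i => v ^^^ (natQ (s + (2 + i) * (2 + k) + ((2 + k) - (2 + i))) ^^^ natQ (s + (2 + i) * (2 + k))))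
          (natQ (s + 2 * (2 + k) - 1) ^^^ natQ s) := by
  rw [List.range_add, List.foldl_append, List.foldl_map]
  refine congrArg (fun I => (List.range k).foldl
    (fun v i => v ^^^ (natQ (s + (2 + i) * (2 + k) + ((2 + k) - (2 + i))) ^^^ natQ (s + (2 + i) * (2 + k)))) I) ?_
  have h0a : s + 0 * (2 + k) + ((2 + k) - 0) = s + (2 + k) := by omega
  have h0b : s + 0 * (2 + k) = s := by omega
  have h1a : s + 1 * (2 + k) + ((2 + k) - 1) = s + 2 * (2 + k) - 1 := by omega
  have h1b : s + 1 * (2 + k) = s + (2 + k) := by omega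
  show (0 ^^^ (natQ (s + 0 * (2 + k) + ((2 + k) - 0)) ^^^ natQ (s + 0 * (2 + k))))
        ^^^ (natQ (s + 1 * (2 + k) + ((2 + k) - 1)) ^^^ natQ (s + 1 * (2 + k)))
      = natQ (s + 2 * (2 + k) - 1) ^^^ natQ s
  rw [h0a, h0b, h1a, h1b, Nat.zero_xor]
  generalize natQ (s + (2 + k)) = A
  generalize natQ (s + 2 * (2 + k) - 1) = C
  generalize natQ s = B
  calc (A ^^^ B) ^^^ (C ^^^ A) = (A ^^^ A) ^^^ (C ^^^ B) := by
        simp [Nat.xor_comm, Nat.xor_left_comm]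
    _ = C ^^^ B := by rw [Nat.xor_self, Nat.zero_xor]

-- A equals B for start = ↑s, length = ↑L with 1 ≤ L and the cap guard passing
lemma main_eq (s L : Nat) (hL : 1 ≤ L)
    (hcap : ¬((s : Int) + ((L : Int) * (L : Int)) - 1 > 2000000000)) :
    solution (s : Int) (L : Int) = solution_alt (s : Int) (L : Int) := by
  have hneg : ¬((s : Int) < 0 ∨ (L : Int) < 0) := by omega
  unfold solution solution_alt
  rw [if_neg hneg, if_neg hneg, if_neg hcap, if_neg hcap]
  -- reduce B to a Nat computation
  have hB :
      (PySem.List.pyRange 0 (L : Int) 1).foldl (fun val r =>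
          (PySem.List.pyRange 0 ((L : Int) - r) 1).foldl
            (fun v c => PySem.Int.bxor v ((s : Int) + r * (L : Int) + c)) val) 0
        = (((List.range L).foldl
              (fun v r => v ^^^ (natQ (s + r * L + (L - r)) ^^^ natQ (s + r * L))) 0 : Nat) : Int) := by
    rw [pyRange_cast L]
    have h := fold_cast_outer
      (fun val r =>
        (PySem.List.pyRange 0 ((L : Int) - r) 1).foldl
          (fun v c => PySem.Int.bxor v ((s : Int) + r * (L : Int) + c)) val)
      (fun v r => (List.range (L - r)).foldl (fun acc c => acc ^^^ (s + r * L + c)) v)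
      (List.range L) 0 ?_
    · rw [show ((0 : Nat) : Int) = (0 : Int) by simp] at h
      rw [h]
      refine congrArg (fun n : Nat => (n : Int)) ?_
      rw [show (fun (v r : Nat) => (List.range (L - r)).foldl (fun acc c => acc ^^^ (s + r * L + c)) v)
            = fun (v r : Nat) => v ^^^ (natQ (s + r * L + (L - r)) ^^^ natQ (s + r * L)) from
          funext fun v => funext fun r => by
            rw [foldl_xor_shift (fun c => s + r * L + c), natQ_interval (s + r * L) (L - r)]]
    · intro w r _
      dsimp only
      rw [pyRange_cast_sub L r, List.foldl_map]
      have hfun : (fun (acc : Int) (c : Nat) => PySem.Int.bxor acc ((s : Int) + (r : Int) * (L : Int) + (c : Int)))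
          = fun (acc : Int) (c : Nat) => PySem.Int.bxor acc (((s + r * L + c : Nat) : Int)) := by
        funext acc c; congr 1
      rw [hfun]
      exact foldl_bxor_cast (fun c => s + r * L + c) (List.range (L - r)) w
  rw [hB]
  by_cases hL1 : L = 1
  · subst hL1
    rw [if_pos (by norm_num)]
    norm_num [List.range_one, List.range_zero]
    rw [natQ_succ]
    generalize natQ s = B
    rw [Nat.xor_comm B s, Nat.xor_assoc, Nat.xor_self, Nat.xor_zero]
  · -- L ≥ 2
    have hL2 : 2 ≤ L := by omega
    rw [if_neg (show ¬((L : Int) = 1) by omega)]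
    -- the initial value of A's loop is the XOR over the first two (merged) rows
    have hval1 : (if (s : Int) > 1
          then PySem.Int.bxor (pyXOR ((s : Int) + 2 * ((L : Int) - 1))) (pyXOR ((s : Int) - 1))
          else pyXOR ((s : Int) + 2 * ((L : Int) - 1)))
        = (((natQ (s + 2 * L - 1) ^^^ natQ s : Nat)) : Int) := by
      have harg : ((s : Int) + 2 * ((L : Int) - 1)) = ((s + 2 * (L - 1) : Nat) : Int) := by omega
      have hC : natC (s + 2 * (L - 1)) = natQ (s + 2 * L - 1) := by
        rw [← natQ_closed]
        exact congrArg natQ (by omega)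
      by_cases hs : (s : Int) > 1
      · rw [if_pos hs]
        have hs2 : 2 ≤ s := by omega
        rw [harg, pyXOR_natCast, show ((s : Int) - 1) = ((s - 1 : Nat) : Int) by omega,
            pyXOR_natCast, PySem.Int.bxor_natCast]
        refine congrArg (fun n : Nat => (n : Int)) ?_
        rw [hC, ← natQ_closed]
        exact congrArg (fun t => natQ (s + 2 * L - 1) ^^^ natQ t) (by omega)
      · rw [if_neg hs]
        have hQs : natQ s = 0 := by
          rcases (by omega : s = 0 ∨ s = 1) with rfl | rfl
          · exact natQ_zero
          · exact natQ_one
        rw [harg, pyXOR_natCast]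
        refine congrArg (fun n : Nat => (n : Int)) ?_
        rw [hC, hQs, Nat.xor_zero]
    rw [hval1]
    -- reduce A's loop to a Nat computation
    rw [show ((L : Int) - 2) = ((L - 2 : Nat) : Int) by omega, pyRange_cast (L - 2)]
    have hA := fold_cast_outer
      (fun val i =>
        PySem.Int.bxor
          (PySem.Int.bxor val
            (pyXOR ((s : Int) + (L : Int) * (2 + i) - 1 + (((L - 2 : Nat) : Int) - i))))
          (pyXOR ((s : Int) + (L : Int) * (2 + i) - 1)))
      (fun v i => v ^^^ (natQ (s + (2 + i) * L + (L - (2 + i))) ^^^ natQ (s + (2 + i) * L)))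
      (List.range (L - 2)) (natQ (s + 2 * L - 1) ^^^ natQ s) ?_
    · rw [hA]
      refine congrArg (fun n : Nat => (n : Int)) ?_
      -- the pure-Nat identity between the two row decompositions
      obtain ⟨k, rfl⟩ : ∃ k, L = 2 + k := ⟨L - 2, by omega⟩
      rw [show 2 + k - 2 = k by omega]
      exact (nat_main s k).symm
    · intro w i hi
      have hik : i < L - 2 := List.mem_range.mp hi
      dsimp only
      have hm : (((2 + i) * L : Nat) : Int) = (L : Int) * (2 + (i : Int)) := by push_cast; try ring
      have hpos : 0 < (2 + i) * L := Nat.mul_pos (by omega) (by omega)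
      have he2 : ((s : Int) + (L : Int) * (2 + (i : Int)) - 1) = ((s + (2 + i) * L - 1 : Nat) : Int) := by
        omega
      have he1 : ((s : Int) + (L : Int) * (2 + (i : Int)) - 1 + (((L - 2 : Nat) : Int) - (i : Int)))
          = ((s + (2 + i) * L - 1 + (L - 2 - i) : Nat) : Int) := by omega
      rw [he1, he2, pyXOR_natCast, pyXOR_natCast, PySem.Int.bxor_natCast, PySem.Int.bxor_natCast]
      refine congrArg (fun n : Nat => (n : Int)) ?_
      rw [Nat.xor_assoc]
      congr 1
      congr 1
      · rw [← natQ_closed]; exact congrArg natQ (by omega)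
      · rw [← natQ_closed]; exact congrArg natQ (by omega)

-- value of A on the D_ region for start ≥ 2 (length = 0): it returns start - 1
lemma a_zero_val (s : Nat) (hs : 2 ≤ s) (hcap : ¬((s : Int) + 0 - 1 > 2000000000)) :
    solution (s : Int) 0 = ((s - 1 : Nat) : Int) := by
  unfold solution
  rw [if_neg (by omega), if_neg (by simpa using hcap), if_neg (by norm_num)]
  rw [show PySem.List.pyRange 0 ((0 : Int) - 2) 1 = [] from PySem.List.pyRange_one_eq_nil (by norm_num)]
  rw [List.foldl_nil, if_pos (by omega : (s : Int) > 1)]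
  rw [show ((s : Int) + 2 * ((0 : Int) - 1)) = ((s - 2 : Nat) : Int) by omega,
      show ((s : Int) - 1) = ((s - 1 : Nat) : Int) by omega,
      pyXOR_natCast, pyXOR_natCast, PySem.Int.bxor_natCast]
  congr 1
  rw [show natC (s - 2) = natQ (s - 1) from by rw [← natQ_closed]; exact congrArg natQ (by omega),
      show natC (s - 1) = natQ s from by rw [← natQ_closed]; exact congrArg natQ (by omega)]
  have h := natQ_succ (s - 1)
  rw [show s - 1 + 1 = s from by omega] at h
  rw [h, ← Nat.xor_assoc, Nat.xor_self, Nat.zero_xor]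

-- B returns 0 whenever length = 0 and the guards pass
lemma b_zero_val (start : Int) (h0 : 0 ≤ start) (hcap : ¬(start + 0 * 0 - 1 > 2000000000)) :
    solution_alt start 0 = 0 := by
  unfold solution_alt
  rw [if_neg (by omega), if_neg (by simpa using hcap)]
  rw [show PySem.List.pyRange 0 (0 : Int) 1 = [] from PySem.List.pyRange_one_eq_nil (by norm_num)]
  rfl

-- ===== VERDICT (by name: the statement is the Claim_ definition above) =====
theorem solution_spec : Claim_unchanged_solution := by
  intro start length _ hnD
  by_cases hneg : start < 0 ∨ length < 0
  · unfold solution solution_alt; rw [if_pos hneg, if_pos hneg]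
  by_cases hcap : start + length * length - 1 > 2000000000
  · unfold solution solution_alt
    rw [if_neg hneg, if_neg hneg, if_pos hcap, if_pos hcap]
  rcases (by omega : length = 0 ∨ 1 ≤ length) with rfl | hlen
  · have hs1 : start = 1 := by
      by_contra hne
      exact hnD ⟨rfl, by omega, hne, by omega⟩
    subst hs1
    decide
  · obtain ⟨L, rfl⟩ : ∃ L : Nat, length = (L : Int) := ⟨length.toNat, by omega⟩
    obtain ⟨s, rfl⟩ : ∃ s : Nat, start = (s : Int) := ⟨start.toNat, by omega⟩
    exact main_eq s L (by omega) hcap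

theorem solution_changed : Claim_changed_solution := by
  unfold Claim_changed_solution; decide

theorem solution_tight : Claim_exact_solution := by
  intro start length _ hD
  obtain ⟨rfl, h0, hne1, hcap'⟩ := hD
  have hcapB : ¬(start + 0 * 0 - 1 > 2000000000) := by omega
  rw [b_zero_val start h0 hcapB]
  rcases (by omega : start = 0 ∨ 2 ≤ start) with rfl | hs2
  · decide
  · obtain ⟨s, rfl⟩ : ∃ s : Nat, start = (s : Int) := ⟨start.toNat, by omega⟩
    rw [a_zero_val s (by omega) (by omega)]
    have : 1 ≤ s - 1 := by omega
    omega
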